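-- pv_equiv track=rewrite | github.com/tadeaspaule/logic-toolkit | logic-toolkit.py | _is_valid_rule
-- ===== SOURCE A (Python) =====
-- def _is_valid_rule(rule_string):
--     '''
--     Checks whether a given rule is in the valid format
--     Valid format looks like this: 'A', 'A->B', 'A,B->C'
--     '''
--
--     if "->" not in rule_string:
--         return len(rule_string) == 1 and rule_string[0].isupper()
--
--     if rule_string.count("-") != 1 or rule_string.count(">") != 1:
--         return False
--
--     pre_arrow = rule_string[:rule_string.index("-")].split(",")
--     post_arrow = rule_string[rule_string.index(">")+1:]
--     if len(post_arrow) > 1 or not post_arrow.isupper():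
--         return False
--
--     for pa in pre_arrow:
--         if len(pa) > 1 or not pa.isupper():
--             return False
--
--     return True
-- ===== SOURCE B (Python) =====
-- def _is_valid_rule(rule_string):
--     '''Single-pass finite-state machine over the characters: recognizes the
--     grammar  U | U(,U)*->U  (U = one uppercase char) in one scan, instead of
--     counting dashes, indexing and slicing.'''
--     # states: 0 expect first pre letter, 1 seen lone first letter,
--     #         2 expect pre letter after comma, 3 seen pre letter (comma used),
--     #         4 seen '-', 5 expect post letter, 6 done, -1 dead
--     state = 0
--     for c in rule_string:
--         if state == 0:
--             state = 1 if c.isupper() else -1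
--         elif state == 1 or state == 3:
--             if c == ',':
--                 state = 2
--             elif c == '-':
--                 state = 4
--             else:
--                 state = -1
--         elif state == 2:
--             state = 3 if c.isupper() else -1
--         elif state == 4:
--             state = 5 if c == '>' else -1
--         elif state == 5:
--             state = 6 if c.isupper() else -1
--         else:
--             state = -1
--         if state == -1:
--             return False
--     return state == 1 or state == 6
-- ===== Notes on version B (the rewrite author's own statement) =====
-- stated objective: alternative
-- what changed: B recognizes the rule grammar U | U(,U)*->U with a single-pass finite-state machine over the characters (7-state DFA with an explicit state variable), replacing A's staged parsing by substring test, dash/greater-than counting, index lookup, slicing and comma-splitting.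
import Mathlib
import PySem

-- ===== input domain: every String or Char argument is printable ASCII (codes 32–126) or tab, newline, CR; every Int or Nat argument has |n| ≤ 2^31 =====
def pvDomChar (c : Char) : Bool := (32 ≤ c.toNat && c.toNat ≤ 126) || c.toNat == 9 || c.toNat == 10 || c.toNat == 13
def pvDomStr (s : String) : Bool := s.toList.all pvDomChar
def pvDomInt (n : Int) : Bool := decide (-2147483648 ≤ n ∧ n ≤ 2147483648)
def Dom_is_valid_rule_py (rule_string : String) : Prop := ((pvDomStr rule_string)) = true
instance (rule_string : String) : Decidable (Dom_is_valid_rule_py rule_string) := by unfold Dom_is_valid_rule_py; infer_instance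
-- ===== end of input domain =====

-- B replaces A's staged parsing (substring test, '-'/'>' counting, index, slice, comma-split)
-- by a single-pass finite-state machine over the characters; objective: alternative algorithm, no speed claim.

-- hand port of Python str.isupper() (PySem has only the Char form): at least one cased
-- character and no lowercase one; exact on the ASCII domain, where the cased characters
-- are exactly the letters.  Used by A's port (A calls .isupper() on strings).
def pvStrIsupper (cs : List Char) : Bool :=
  cs.any PySem.Chars.isalpha && cs.all (fun c => !(PySem.Chars.islower c))

-- ===== PORT A =====
-- A over the character list (is_valid_rule_py is the String wrapper below)
def pvRuleA (s : List Char) : Bool :=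
  if !(PySem.Chars.isIn ['-', '>'] s) then
    -- return len(rule_string) == 1 and rule_string[0].isupper()
    if s.length = 1 then
      match PySem.List.pyGet? s (0 : Int) with
      | some c => PySem.Chars.isupper c
      | none => false        -- unreachable: length = 1
    else false
  else if PySem.Chars.count s ['-'] ≠ 1 ∨ PySem.Chars.count s ['>'] ≠ 1 then false
  else
    -- rule_string.index("-") = Chars.find here: the count guard guarantees "-" occurs,
    -- so Python's .index cannot raise and agrees with find
    let pre := PySem.Chars.splitOn (PySem.Chars.slice s none (some (PySem.Chars.find s ['-']))) [',']
    let post := PySem.Chars.slice s (some (PySem.Chars.find s ['>'] + 1)) none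
    if 1 < post.length ∨ pvStrIsupper post = false then false
    else pre.all fun pa => !(decide (1 < pa.length) || !(pvStrIsupper pa))

def is_valid_rule_py (rule_string : String) : Bool := pvRuleA rule_string.toList

-- ===== PORT B =====
-- B's DFA transition function, branch for branch as in Source B
-- (states: 0 expect first pre letter, 1 seen lone first letter, 2 expect pre letter
--  after comma, 3 seen pre letter with comma used, 4 seen '-', 5 expect post letter,
--  6 done, -1 dead)
def pvStepB (state : Int) (c : Char) : Int :=
  if state = 0 then (if PySem.Chars.isupper c then 1 else -1)
  else if state = 1 ∨ state = 3 then (if c = ',' then 2 else if c = '-' then 4 else -1)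
  else if state = 2 then (if PySem.Chars.isupper c then 3 else -1)
  else if state = 4 then (if c = '>' then 5 else -1)
  else if state = 5 then (if PySem.Chars.isupper c then 6 else -1)
  else -1

-- the loop of Source B; its early 'return False' on state -1 is the same as running on,
-- because -1 is absorbing and is not an accepting state
def pvRunB (state : Int) (s : List Char) : Int := s.foldl pvStepB state

def is_valid_rule_py_alt (rule_string : String) : Bool :=
  let st := pvRunB 0 rule_string.toList
  decide (st = 1 ∨ st = 6)

-- ===== PRECONDITION & SPEC =====
def Spec_is_valid_rule_py (rule_string : String) (out : Bool) : Prop := out = is_valid_rule_py_alt rule_string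
instance (rule_string : String) (out : Bool) : Decidable (Spec_is_valid_rule_py rule_string out) := by unfold Spec_is_valid_rule_py; infer_instance

-- ===== CLAIM (what is proved, stated in full; the proofs are below) =====
def Claim_equal_is_valid_rule_py : Prop := ∀ (rule_string : String), Dom_is_valid_rule_py rule_string → Spec_is_valid_rule_py rule_string (is_valid_rule_py rule_string)

-- ===== LEMMAS AND PROOFS =====

-- ---- step/run computation lemmas ----
theorem pv_run_nil (st : Int) : pvRunB st [] = st := rfl
theorem pv_run_cons (st : Int) (c : Char) (r : List Char) :
    pvRunB st (c :: r) = pvRunB (pvStepB st c) r := rfl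

theorem pv_step0 (c : Char) : pvStepB 0 c = if PySem.Chars.isupper c then 1 else -1 := by
  norm_num [pvStepB]
theorem pv_step1 (c : Char) :
    pvStepB 1 c = if c = ',' then 2 else if c = '-' then 4 else -1 := by norm_num [pvStepB]
theorem pv_step3 (c : Char) :
    pvStepB 3 c = if c = ',' then 2 else if c = '-' then 4 else -1 := by norm_num [pvStepB]
theorem pv_step2 (c : Char) : pvStepB 2 c = if PySem.Chars.isupper c then 3 else -1 := by
  norm_num [pvStepB]
theorem pv_step4 (c : Char) : pvStepB 4 c = if c = '>' then 5 else -1 := by norm_num [pvStepB]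
theorem pv_step5 (c : Char) : pvStepB 5 c = if PySem.Chars.isupper c then 6 else -1 := by
  norm_num [pvStepB]
theorem pv_step6 (c : Char) : pvStepB 6 c = -1 := by norm_num [pvStepB]
theorem pv_stepDead (c : Char) : pvStepB (-1) c = -1 := by norm_num [pvStepB]

theorem pv_run_dead (s : List Char) : pvRunB (-1) s = -1 := by
  induction s with
  | nil => rfl
  | cons c r ih => rw [pv_run_cons, pv_stepDead, ih]

-- a single-char token's isupper() is the Char-level isupper
theorem pv_single_upper (c : Char) : pvStrIsupper [c] = PySem.Chars.isupper c := by
  simp only [pvStrIsupper, List.any_cons, List.any_nil, List.all_cons, List.all_nil,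
    Bool.or_false, Bool.and_true, PySem.Chars.isalpha]
  cases hl : PySem.Chars.islower c with
  | false => simp
  | true =>
    have hu : PySem.Chars.isupper c = false := by
      simp only [PySem.Chars.islower, Bool.and_eq_true, decide_eq_true_eq] at hl
      simp only [PySem.Chars.isupper, Bool.and_eq_false_iff, decide_eq_false_iff_not]
      right
      intro h
      exact absurd (le_trans hl.1 h) (by decide)
    simp [hu]

-- from state 5: the run accepts iff exactly one uppercase char remains
theorem pv_run5_six (b : List Char) :
    pvRunB 5 b = 6 ↔ ∃ c, b = [c] ∧ PySem.Chars.isupper c = true := by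
  match b with
  | [] => simp [pv_run_nil]
  | [c] =>
    rw [pv_run_cons, pv_step5]
    by_cases hu : PySem.Chars.isupper c = true
    · simp [hu, pv_run_nil]
    · rw [if_neg hu, pv_run_nil]
      simp only [Bool.not_eq_true] at hu
      constructor
      · intro h; exact absurd h (by decide)
      · rintro ⟨d, hd, hud⟩
        cases hd
        rw [hud] at hu; cases hu
  | c :: d :: r =>
    rw [pv_run_cons, pv_step5]
    constructor
    · intro h
      by_cases hu : PySem.Chars.isupper c = true
      · rw [if_pos hu, pv_run_cons, pv_step6, pv_run_dead] at h; exact absurd h (by decide)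
      · rw [if_neg hu, pv_run_dead] at h; exact absurd h (by decide)
    · rintro ⟨e, he, _⟩; cases he

theorem pv_run4_six (b : List Char) :
    pvRunB 4 b = 6 → ∃ c, b = ['>', c] ∧ PySem.Chars.isupper c = true := by
  match b with
  | [] => intro h; rw [pv_run_nil] at h; exact absurd h (by decide)
  | x :: r =>
    rw [pv_run_cons, pv_step4]
    by_cases hx : x = '>'
    · subst hx
      rw [if_pos rfl]
      intro h
      obtain ⟨c, hc, hu⟩ := (pv_run5_six r).mp h
      exact ⟨c, by rw [hc], hu⟩
    · rw [if_neg hx, pv_run_dead]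
      intro h; exact absurd h (by decide)

-- an uppercase char is neither '-' nor '>'
theorem pv_upper_ne (c : Char) (hu : PySem.Chars.isupper c = true) : c ≠ '-' ∧ c ≠ '>' := by
  constructor <;> rintro rfl <;> exact absurd hu (by decide)

-- state 1 is never reached again: from states 2..6 and -1 the run never ends in 1
theorem pv_run_no1 (s : List Char) : ∀ st : Int,
    (st = 2 ∨ st = 3 ∨ st = 4 ∨ st = 5 ∨ st = 6 ∨ st = -1) → pvRunB st s ≠ 1 := by
  induction s with
  | nil => intro st h; rw [pv_run_nil]; rcases h with h|h|h|h|h|h <;> subst h <;> decide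
  | cons c r ih =>
    intro st h
    rw [pv_run_cons]
    apply ih
    rcases h with h|h|h|h|h|h <;> subst h
    · rw [pv_step2]; split_ifs <;> simp
    · rw [pv_step3]; split_ifs <;> simp
    · rw [pv_step4]; split_ifs <;> simp
    · rw [pv_step5]; split_ifs <;> simp
    · rw [pv_step6]; simp
    · rw [pv_stepDead]; simp

-- the run from 0 ends in 1 only on single-character strings
theorem pv_run0_one (s : List Char) : pvRunB 0 s = 1 → s.length = 1 := by
  match s with
  | [] => intro h; rw [pv_run_nil] at h; exact absurd h (by decide)
  | [c] => intro _; rfl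
  | c :: d :: r =>
    rw [pv_run_cons, pv_step0]
    by_cases hu : PySem.Chars.isupper c = true
    · rw [if_pos hu, pv_run_cons, pv_step1]
      intro h
      exfalso
      split_ifs at h with h1 h2
      · exact pv_run_no1 r 2 (by tauto) h
      · exact pv_run_no1 r 4 (by tauto) h
      · rw [pv_run_dead] at h; exact absurd h (by decide)
    · rw [if_neg hu, pv_run_dead]
      intro h; exact absurd h (by decide)

-- reaching state 6 from a scanning state forces an adjacent "->" and exactly one
-- '-' and one '>' in the remaining input
theorem pv_run_six_struct (s : List Char) : ∀ st : Int, (st = 0 ∨ st = 1 ∨ st = 2 ∨ st = 3) →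
    pvRunB st s = 6 →
    ['-', '>'] <:+: s ∧ s.count '-' = 1 ∧ s.count '>' = 1 := by
  induction s with
  | nil => intro st h hr; rw [pv_run_nil] at hr; rcases h with h|h|h|h <;> subst h <;> cases hr
  | cons c r ih =>
    intro st h hr
    rw [pv_run_cons] at hr
    have lift : ∀ st' : Int, (st' = 0 ∨ st' = 1 ∨ st' = 2 ∨ st' = 3) →
        pvRunB st' r = 6 → c ≠ '-' → c ≠ '>' →
        ['-', '>'] <:+: (c :: r) ∧ (c :: r).count '-' = 1 ∧ (c :: r).count '>' = 1 := by
      intro st' h' hr' hc1 hc2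
      obtain ⟨hi, h1, h2⟩ := ih st' h' hr'
      refine ⟨hi.trans (List.suffix_cons c r).isInfix, ?_, ?_⟩
      · simp [h1, hc1]
      · simp [h2, hc2]
    have dash_case : pvRunB 4 r = 6 → c = '-' →
        ['-', '>'] <:+: (c :: r) ∧ (c :: r).count '-' = 1 ∧ (c :: r).count '>' = 1 := by
      intro h4 hc
      subst hc
      obtain ⟨e, he, hue⟩ := pv_run4_six r h4
      subst he
      obtain ⟨he1, he2⟩ := pv_upper_ne e hue
      refine ⟨⟨[], [e], by simp⟩, ?_, ?_⟩ <;> simp [he1, he2]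
    rcases h with h|h|h|h <;> subst h
    · rw [pv_step0] at hr
      by_cases hu : PySem.Chars.isupper c = true
      · rw [if_pos hu] at hr
        obtain ⟨hc1, hc2⟩ := pv_upper_ne c hu
        exact lift 1 (by tauto) hr hc1 hc2
      · rw [if_neg hu, pv_run_dead] at hr; cases hr
    · rw [pv_step1] at hr
      split_ifs at hr with h1 h2
      · exact lift 2 (by tauto) hr (by rw [h1]; decide) (by rw [h1]; decide)
      · exact dash_case hr h2
      · rw [pv_run_dead] at hr; cases hr
    · rw [pv_step2] at hr
      by_cases hu : PySem.Chars.isupper c = true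
      · rw [if_pos hu] at hr
        obtain ⟨hc1, hc2⟩ := pv_upper_ne c hu
        exact lift 3 (by tauto) hr hc1 hc2
      · rw [if_neg hu, pv_run_dead] at hr; cases hr
    · rw [pv_step3] at hr
      split_ifs at hr with h1 h2
      · exact lift 2 (by tauto) hr (by rw [h1]; decide) (by rw [h1]; decide)
      · exact dash_case hr h2
      · rw [pv_run_dead] at hr; cases hr

-- ---- the pre-arrow grammar U(,U)* as a recursive boolean ----
def pvPre : List Char → Bool
  | [] => false
  | [u] => PySem.Chars.isupper u
  | u :: c :: rest => PySem.Chars.isupper u && decide (c = ',') && pvPre rest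

-- running the DFA over a '-'/'>'-free prefix followed by '-' tests exactly pvPre
theorem pv_pre_run (n : Nat) : ∀ (a rest : List Char), a.length ≤ n → '-' ∉ a → '>' ∉ a →
    (pvRunB 0 (a ++ '-' :: rest) = if pvPre a then pvRunB 4 rest else -1)
    ∧ (pvRunB 2 (a ++ '-' :: rest) = if pvPre a then pvRunB 4 rest else -1) := by
  induction n with
  | zero =>
    intro a rest hlen _ _
    have ha : a = [] := List.eq_nil_of_length_eq_zero (Nat.le_zero.mp hlen)
    subst ha
    constructor
    · rw [List.nil_append, pv_run_cons, pv_step0,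
        show PySem.Chars.isupper '-' = false from by decide]
      simp [pvPre, pv_run_dead]
    · rw [List.nil_append, pv_run_cons, pv_step2,
        show PySem.Chars.isupper '-' = false from by decide]
      simp [pvPre, pv_run_dead]
  | succ n ih =>
    intro a rest hlen hda hga
    match a with
    | [] =>
      constructor
      · rw [List.nil_append, pv_run_cons, pv_step0,
          show PySem.Chars.isupper '-' = false from by decide]
        simp [pvPre, pv_run_dead]
      · rw [List.nil_append, pv_run_cons, pv_step2,
          show PySem.Chars.isupper '-' = false from by decide]
        simp [pvPre, pv_run_dead]
    | [u] =>
      have hu1 : u ≠ '-' := by intro h; exact hda (by rw [h]; exact List.mem_cons_self)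
      constructor
      · rw [List.cons_append, List.nil_append, pv_run_cons, pv_step0]
        by_cases hu : PySem.Chars.isupper u = true
        · rw [if_pos hu, pv_run_cons, pv_step1, if_neg (by decide), if_pos rfl]
          simp [pvPre, hu]
        · rw [if_neg hu, pv_run_dead]
          simp [pvPre, Bool.eq_false_iff.mpr (fun he => hu he)]
      · rw [List.cons_append, List.nil_append, pv_run_cons, pv_step2]
        by_cases hu : PySem.Chars.isupper u = true
        · rw [if_pos hu, pv_run_cons, pv_step3, if_neg (by decide), if_pos rfl]
          simp [pvPre, hu]
        · rw [if_neg hu, pv_run_dead]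
          simp [pvPre, Bool.eq_false_iff.mpr (fun he => hu he)]
    | u :: c :: a'' =>
      have hc1 : c ≠ '-' := by
        intro h; exact hda (by rw [h]; exact List.mem_cons_of_mem u List.mem_cons_self)
      have hd'' : '-' ∉ a'' := fun h =>
        hda (List.mem_cons_of_mem u (List.mem_cons_of_mem c h))
      have hg'' : '>' ∉ a'' := fun h =>
        hga (List.mem_cons_of_mem u (List.mem_cons_of_mem c h))
      have hlen'' : a''.length ≤ n := by simp at hlen; omega
      have tail_eq : ∀ hu : PySem.Chars.isupper u = true,
          (pvRunB 1 ((c :: a'') ++ '-' :: rest)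
            = if decide (c = ',') && pvPre a'' then pvRunB 4 rest else -1) ∧
          (pvRunB 3 ((c :: a'') ++ '-' :: rest)
            = if decide (c = ',') && pvPre a'' then pvRunB 4 rest else -1) := by
        intro _
        constructor
        · rw [List.cons_append, pv_run_cons, pv_step1]
          by_cases hcc : c = ','
          · rw [if_pos hcc, (ih a'' rest hlen'' hd'' hg'').2]
            simp [hcc]
          · rw [if_neg hcc, if_neg hc1, pv_run_dead]
            simp [hcc]
        · rw [List.cons_append, pv_run_cons, pv_step3]
          by_cases hcc : c = ','
          · rw [if_pos hcc, (ih a'' rest hlen'' hd'' hg'').2]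
            simp [hcc]
          · rw [if_neg hcc, if_neg hc1, pv_run_dead]
            simp [hcc]
      constructor
      · rw [List.cons_append, pv_run_cons, pv_step0]
        by_cases hu : PySem.Chars.isupper u = true
        · rw [if_pos hu, (tail_eq hu).1]
          simp [pvPre, hu]
        · rw [if_neg hu, pv_run_dead]
          simp [pvPre, Bool.eq_false_iff.mpr (fun he => hu he)]
      · rw [List.cons_append, pv_run_cons, pv_step2]
        by_cases hu : PySem.Chars.isupper u = true
        · rw [if_pos hu, (tail_eq hu).2]
          simp [pvPre, hu]
        · rw [if_neg hu, pv_run_dead]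
          simp [pvPre, Bool.eq_false_iff.mpr (fun he => hu he)]

-- acceptance from state 5 as a boolean
theorem pv_accept5 (b : List Char) :
    decide (pvRunB 5 b = 1 ∨ pvRunB 5 b = 6) = (decide (b.length = 1) && pvStrIsupper b) := by
  have h1 : pvRunB 5 b ≠ 1 := pv_run_no1 b 5 (by tauto)
  by_cases h6 : pvRunB 5 b = 6
  · obtain ⟨c, hc, hu⟩ := (pv_run5_six b).mp h6
    subst hc
    simp [h6, pv_single_upper, hu]
  · rw [decide_eq_false (by tauto)]
    match b with
    | [] => simp
    | [c] =>
      have : ¬ PySem.Chars.isupper c = true := by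
        intro hu
        exact h6 ((pv_run5_six [c]).mpr ⟨c, rfl, hu⟩)
      rw [pv_single_upper]
      simp [Bool.eq_false_iff.mpr this]
    | c :: d :: r => simp

-- ---- splitOn on "," : structural lemmas derived from the fuelled go ----
theorem pv_go_acc (sep : List Char) : ∀ (fuel : Nat) (l cur : List Char) (acc : List (List Char)),
    PySem.Chars.splitOn.go sep fuel l cur acc
      = acc.reverse ++ PySem.Chars.splitOn.go sep fuel l cur [] := by
  intro fuel
  induction fuel with
  | zero => intro l cur acc; rw [PySem.Chars.splitOn.go, PySem.Chars.splitOn.go]; simp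
  | succ n ih =>
    intro l cur acc
    cases l with
    | nil =>
      have h1 : ∀ acc', PySem.Chars.splitOn.go sep (n+1) [] cur acc' = (cur.reverse :: acc').reverse := by
        intro acc'
        rw [PySem.Chars.splitOn.go]
        omega
      rw [h1, h1]; simp
    | cons x t =>
      by_cases hp : sep.isPrefixOf (x :: t) = true
      · rw [PySem.Chars.splitOn.go, if_pos hp, PySem.Chars.splitOn.go, if_pos hp]
        rw [ih _ _ (cur.reverse :: acc), ih _ _ [cur.reverse]]
        simp
      · have hp' : sep.isPrefixOf (x :: t) = false := Bool.eq_false_iff.mpr (fun h => hp h)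
        rw [PySem.Chars.splitOn.go, if_neg (by simp [hp']),
          PySem.Chars.splitOn.go, if_neg (by simp [hp'])]
        exact ih t (x :: cur) acc

theorem pv_go_cur (sep : List Char) : ∀ (fuel : Nat) (l cur : List Char),
    PySem.Chars.splitOn.go sep fuel l cur []
      = (PySem.Chars.splitOn.go sep fuel l [] []).modifyHead (cur.reverse ++ ·) := by
  intro fuel
  induction fuel with
  | zero =>
    intro l cur
    rw [PySem.Chars.splitOn.go, PySem.Chars.splitOn.go]
    simp
  | succ n ih =>
    intro l cur
    cases l with
    | nil =>
      have h1 : ∀ cur', PySem.Chars.splitOn.go sep (n+1) [] cur' [] = [cur'.reverse] := by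
        intro cur'
        rw [PySem.Chars.splitOn.go]
        · simp
        · omega
      rw [h1, h1]; simp
    | cons x t =>
      by_cases hp : sep.isPrefixOf (x :: t) = true
      · rw [PySem.Chars.splitOn.go, if_pos hp, PySem.Chars.splitOn.go, if_pos hp]
        simp only [List.reverse_nil]
        rw [pv_go_acc sep n _ [] [cur.reverse], pv_go_acc sep n _ [] [[]]]
        simp
      · have hp' : sep.isPrefixOf (x :: t) = false := Bool.eq_false_iff.mpr (fun h => hp h)
        rw [PySem.Chars.splitOn.go, if_neg (by simp [hp']),
          PySem.Chars.splitOn.go, if_neg (by simp [hp'])]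
        rw [ih t (x :: cur), ih t [x]]
        cases h : PySem.Chars.splitOn.go sep n t [] [] with
        | nil => simp
        | cons hh tt => simp

theorem pv_split_comma_sep (s : List Char) :
    PySem.Chars.splitOn (',' :: s) [','] = [] :: PySem.Chars.splitOn s [','] := by
  rw [PySem.Chars.splitOn, PySem.Chars.splitOn]
  have hlen : (',' :: s).length + 1 = (s.length + 1) + 1 := by simp
  rw [hlen, PySem.Chars.splitOn.go, if_pos (by simp [List.isPrefixOf])]
  have hdrop : List.drop [','].length (',' :: s) = s := by simp
  rw [hdrop]
  simp only [List.reverse_nil]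
  rw [pv_go_acc [','] (s.length + 1) s [] [[]]]
  simp

theorem pv_split_comma_other (c : Char) (s : List Char) (hc : c ≠ ',') :
    PySem.Chars.splitOn (c :: s) [','] = (PySem.Chars.splitOn s [',']).modifyHead (c :: ·) := by
  rw [PySem.Chars.splitOn, PySem.Chars.splitOn]
  have hlen : (c :: s).length + 1 = (s.length + 1) + 1 := by simp
  have hpre : List.isPrefixOf [','] (c :: s) = false := by
    simp [List.isPrefixOf]
    intro h
    exact absurd h.symm hc
  rw [hlen, PySem.Chars.splitOn.go, if_neg (by simp [hpre])]
  rw [pv_go_cur [','] (s.length + 1) s [c]]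
  rfl

theorem pv_split_ne_nil (s : List Char) :
    ∃ h t, PySem.Chars.splitOn s [','] = h :: t := by
  induction s with
  | nil => exact ⟨[], [], by decide⟩
  | cons c r ih =>
    by_cases hc : c = ','
    · subst hc
      exact ⟨[], PySem.Chars.splitOn r [','], pv_split_comma_sep r⟩
    · obtain ⟨h, t, ht⟩ := ih
      exact ⟨c :: h, t, by rw [pv_split_comma_other c r hc, ht]; rfl⟩

-- pvPre is exactly "every comma token is a single uppercase char"
theorem pv_pre_split (n : Nat) : ∀ (s : List Char), s.length ≤ n →
    pvPre s = (PySem.Chars.splitOn s [',']).all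
      (fun t => decide (t.length = 1) && pvStrIsupper t) := by
  induction n with
  | zero =>
    intro s hlen
    have hs : s = [] := List.eq_nil_of_length_eq_zero (Nat.le_zero.mp hlen)
    subst hs
    decide
  | succ n ih =>
    intro s hlen
    match s with
    | [] => decide
    | [u] =>
      by_cases hu : u = ','
      · subst hu; decide
      · rw [pv_split_comma_other u [] hu]
        have h0 : PySem.Chars.splitOn ([] : List Char) [','] = [[]] := by decide
        rw [h0]
        simp [pvPre, pv_single_upper]
    | u :: c :: rest =>
      have hlen' : rest.length ≤ n := by simp at hlen; omega
      by_cases hc : c = ','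
      · subst hc
        by_cases hu : u = ','
        · subst hu
          rw [pv_split_comma_sep, pv_split_comma_sep]
          simp [pvPre, show PySem.Chars.isupper ',' = false from by decide]
        · rw [pv_split_comma_other u (',' :: rest) hu, pv_split_comma_sep]
          rw [List.modifyHead_cons]
          rw [show pvPre (u :: ',' :: rest) = (PySem.Chars.isupper u && pvPre rest) from by
            simp [pvPre]]
          rw [ih rest hlen']
          simp [pv_single_upper]
      · have hpre : pvPre (u :: c :: rest) = false := by
          simp [pvPre, hc]
        rw [hpre]
        by_cases hu : u = ','
        · subst hu
          rw [pv_split_comma_sep]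
          simp
        · rw [pv_split_comma_other u (c :: rest) hu, pv_split_comma_other c rest hc]
          obtain ⟨h, t, ht⟩ := pv_split_ne_nil rest
          rw [ht, List.modifyHead_cons, List.modifyHead_cons]
          simp

-- ---- lemmas about A's parsing (count / find / slices) ----
theorem pv_count_go (c : Char) : ∀ (fuel : Nat) (l : List Char) (acc : Nat),
    l.length ≤ fuel → PySem.Chars.count.go [c] fuel l acc = acc + l.count c := by
  intro fuel
  induction fuel with
  | zero =>
    intro l acc h
    have hl : l = [] := List.eq_nil_of_length_eq_zero (Nat.le_zero.mp h)
    subst hl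
    simp [PySem.Chars.count.go]
  | succ n ih =>
    intro l acc h
    cases l with
    | nil => simp [PySem.Chars.count.go]
    | cons x t =>
      by_cases hx : c = x
      · subst hx
        have hpre : List.isPrefixOf [c] (c :: t) = true := by
          simp [List.isPrefixOf]
        rw [PySem.Chars.count.go, if_pos hpre]
        simp only [List.length_singleton, List.drop_succ_cons, List.drop_zero]
        rw [ih t (acc + 1) (by simpa using h)]
        simp
        omega
      · have hpre : List.isPrefixOf [c] (x :: t) = false := by
          simp [List.isPrefixOf, hx]
        rw [PySem.Chars.count.go, if_neg (by simp [hpre])]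
        rw [ih t acc (by simpa using h)]
        simp [List.count_cons]
        exact fun h => hx h.symm

theorem pv_count_single (c : Char) (l : List Char) :
    PySem.Chars.count l [c] = l.count c := by
  rw [PySem.Chars.count, if_neg (by simp)]
  simpa using pv_count_go c l.length l 0 le_rfl

-- find on a one-character needle returns the index of its first occurrence
theorem pv_find_go (c : Char) : ∀ (l rest : List Char) (k : Nat), c ∉ l →
    PySem.Chars.find.go [c] (l ++ c :: rest) k = (k : Int) + l.length := by
  intro l
  induction l with
  | nil =>
    intro rest k _
    have hpre : List.isPrefixOf [c] (c :: rest) = true := by simp [List.isPrefixOf]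
    rw [List.nil_append, PySem.Chars.find.go, if_pos hpre]
    simp
  | cons x t ih =>
    intro rest k hx
    have hcx : ¬ c = x := fun h => hx (h ▸ List.mem_cons_self)
    have hpre : List.isPrefixOf [c] (x :: (t ++ c :: rest)) = false := by
      simp [List.isPrefixOf, hcx]
    rw [List.cons_append, PySem.Chars.find.go, if_neg (by simp [hpre])]
    rw [ih rest (k + 1) (fun h => hx (List.mem_cons_of_mem x h))]
    simp only [List.length_cons]
    push_cast
    ring

theorem pv_find_single (c : Char) (l rest : List Char) (h : c ∉ l) :
    PySem.Chars.find (l ++ c :: rest) [c] = (l.length : Int) := by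
  rw [PySem.Chars.find, pv_find_go c l rest 0 h]
  simp

-- Chars-level form of Str.isIn_iff_infix
theorem pv_isIn_iff (sub s : List Char) : PySem.Chars.isIn sub s = true ↔ sub <:+: s := by
  have h := PySem.Str.isIn_iff_infix (String.ofList sub) (String.ofList s)
  simpa using h

-- the two per-token tests agree ("".isupper() is False)
theorem pv_tok_eq (t : List Char) :
    (!(decide (1 < t.length) || !(pvStrIsupper t))) = (decide (t.length = 1) && pvStrIsupper t) := by
  match t with
  | [] => simp [pvStrIsupper]
  | [x] => simp
  | x :: y :: t' =>
    have h1 : 1 < (x :: y :: t').length := by simp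
    have h2 : ¬ (x :: y :: t').length = 1 := by simp
    simp

theorem pv_all_ext {α : Type} (l : List α) (f g : α → Bool) (h : ∀ x, f x = g x) :
    l.all f = l.all g := congrArg l.all (funext h)

-- A's post-arrow guard is the single-uppercase test on the right-hand side
theorem pv_guard_eq (b : List Char) (x : Bool) :
    (if 1 < b.length ∨ pvStrIsupper b = false then false else x)
      = ((decide (b.length = 1) && pvStrIsupper b) && x) := by
  match b with
  | [] => simp [pvStrIsupper]
  | [y] =>
    by_cases hu : pvStrIsupper [y] = true
    · simp [hu]
    · simp [Bool.eq_false_iff.mpr (fun he => hu he)]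
  | y :: z :: t =>
    have h1 : 1 < (y :: z :: t).length := by simp
    have h2 : ¬ (y :: z :: t).length = 1 := by simp
    simp

-- B's acceptance on a decomposed arrow string
theorem pv_accept_arrow (a b : List Char) (hda : '-' ∉ a) (hga : '>' ∉ a) :
    decide (pvRunB 0 (a ++ '-' :: '>' :: b) = 1 ∨ pvRunB 0 (a ++ '-' :: '>' :: b) = 6)
      = ((decide (b.length = 1) && pvStrIsupper b) && pvPre a) := by
  rw [(pv_pre_run a.length a ('>' :: b) le_rfl hda hga).1]
  by_cases hp : pvPre a = true
  · rw [if_pos hp, hp, Bool.and_true]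
    have h4 : pvRunB 4 ('>' :: b) = pvRunB 5 b := by
      rw [pv_run_cons, pv_step4, if_pos rfl]
    rw [h4]
    exact pv_accept5 b
  · rw [if_neg hp, Bool.eq_false_iff.mpr (fun he => hp he), Bool.and_false]
    decide

-- ---- the main equivalence over character lists ----
theorem pv_main (s : List Char) :
    pvRuleA s = decide (pvRunB 0 s = 1 ∨ pvRunB 0 s = 6) := by
  by_cases hin : PySem.Chars.isIn ['-', '>'] s = true
  · obtain ⟨a, b, hab⟩ := (pv_isIn_iff ['-', '>'] s).mp hin
    subst hab
    by_cases hc : (a ++ ['-', '>'] ++ b).count '-' = 1 ∧ (a ++ ['-', '>'] ++ b).count '>' = 1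
    · -- exactly one '-' and one '>': both sides accept the same decomposition
      have hma : '-' ∉ a := by
        rw [← List.count_eq_zero]
        have := hc.1
        simp [List.count_append] at this ⊢
        omega
      have hga : '>' ∉ a := by
        rw [← List.count_eq_zero]
        have := hc.2
        simp [List.count_append] at this ⊢
        omega
      have hsh : a ++ ['-', '>'] ++ b = a ++ '-' :: ('>' :: b) := by simp
      have hfind1 : PySem.Chars.find (a ++ ['-', '>'] ++ b) ['-'] = (a.length : Int) := by
        rw [hsh]; exact pv_find_single '-' a ('>' :: b) hma
      have hfind2 : PySem.Chars.find (a ++ ['-', '>'] ++ b) ['>'] = (a.length : Int) + 1 := by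
        have hsh2 : a ++ ['-', '>'] ++ b = (a ++ ['-']) ++ '>' :: b := by simp
        have hni : '>' ∉ a ++ ['-'] := by
          intro h
          rcases List.mem_append.mp h with h1 | h2
          · exact hga h1
          · simp at h2
        rw [hsh2, pv_find_single '>' (a ++ ['-']) b hni]
        simp
      have hslice1 : PySem.Chars.slice (a ++ ['-', '>'] ++ b) none (some ((a.length : Nat) : Int)) = a := by
        rw [PySem.Chars.slice_eq_listSlice, PySem.List.slice_to_natCast, List.append_assoc,
          List.take_left]
      have hslice2 :
          PySem.Chars.slice (a ++ ['-', '>'] ++ b) (some ((a.length : Int) + 1 + 1)) none = b := by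
        have hcast : (a.length : Int) + 1 + 1 = ((a.length + 2 : Nat) : Int) := by push_cast; ring
        rw [PySem.Chars.slice_eq_listSlice, hcast, PySem.List.slice_from_natCast]
        have h2 : a.length + 2 = (a ++ ['-', '>']).length := by simp
        rw [h2, List.drop_left]
      rw [pvRuleA]
      rw [if_neg (by simpa using hin)]
      rw [pv_count_single, pv_count_single, if_neg (by tauto)]
      simp only [hfind1, hfind2, hslice1, hslice2]
      rw [pv_all_ext _ _ _ pv_tok_eq, pv_guard_eq]
      rw [hsh, pv_accept_arrow a b hma hga]
      rw [pv_pre_split a.length a le_rfl]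
    · -- a wrong count: A rejects on the guard, and the DFA cannot accept either
      rw [pvRuleA, if_neg (by simpa using hin),
        if_pos (by rw [pv_count_single, pv_count_single]; tauto)]
      have h1 : pvRunB 0 (a ++ ['-', '>'] ++ b) ≠ 1 := by
        intro h
        have := pv_run0_one _ h
        simp at this
        omega
      have h6 : pvRunB 0 (a ++ ['-', '>'] ++ b) ≠ 6 := by
        intro h
        obtain ⟨_, hc1, hc2⟩ := pv_run_six_struct _ 0 (by tauto) h
        exact hc ⟨hc1, hc2⟩
      rw [decide_eq_false (by tauto)]
  · -- no "->" in the string: A does the single-char test; the DFA cannot reach 6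
    have hinf : ¬ ['-', '>'] <:+: s := fun hf => hin ((pv_isIn_iff ['-', '>'] s).mpr hf)
    rw [pvRuleA, if_pos (by simp [Bool.eq_false_iff.mpr (fun he => hin he)])]
    match s with
    | [] => decide
    | [c] =>
      rw [pv_run_cons, pv_step0, pv_run_nil]
      by_cases hu : PySem.Chars.isupper c = true
      · rw [if_pos hu]
        simp [PySem.List.pyGet?, PySem.List.pyIdx?, hu]
      · rw [if_neg hu]
        simp [PySem.List.pyGet?, PySem.List.pyIdx?, Bool.eq_false_iff.mpr (fun he => hu he)]
    | c :: d :: r =>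
      have hlen : ¬ (c :: d :: r).length = 1 := by simp
      rw [if_neg hlen]
      have h1 : pvRunB 0 (c :: d :: r) ≠ 1 := by
        intro h
        exact hlen (pv_run0_one _ h)
      have h6 : pvRunB 0 (c :: d :: r) ≠ 6 := by
        intro h
        exact hinf (pv_run_six_struct _ 0 (by tauto) h).1
      rw [decide_eq_false (by tauto)]

-- ===== VERDICT (by name: the statement is the Claim_ definition above) =====
theorem is_valid_rule_py_spec : Claim_equal_is_valid_rule_py := by
  intro rule_string _
  unfold Spec_is_valid_rule_py is_valid_rule_py is_valid_rule_py_alt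
  exact pv_main rule_string.toList
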